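-- pv_equiv track=rewrite | github.com/Endimion2k/bikestylish-catalog | scripts/parse_categories.py | determine_category_type
-- ===== SOURCE A (Python) =====
-- def determine_category_type(category_path: str) -> str:
--     """Determine category type based on path."""
--
--     if any(term in category_path for term in ['accesorii', 'lumini', 'protectii', 'transport']):
--         return 'accesorii'
--     elif any(term in category_path for term in ['piese', 'anvelope', 'jante', 'lanturi', 'frane']):
--         return 'piese'
--     elif any(term in category_path for term in ['echipament', 'casti', 'manusi', 'tricouri', 'pantofi']):
--         return 'echipament'
--     elif any(term in category_path for term in ['scule', 'intretinere', 'unelte']):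
--         return 'scule'
--     elif any(term in category_path for term in ['e-bike', 'cadre-e-bike', 'protectii-si-accesorii-e-bike']):
--         return 'e-bike'
--     elif any(term in category_path for term in ['copii', 'roti-ajutatoare', 'scaune-pentru-copii']):
--         return 'copii'
--     else:
--         return 'general'
-- ===== SOURCE B (Python) =====
-- # Flat term table with priorities; single full pass keeping the minimal-priority match.
-- TERMS = [
--     ('accesorii', 0), ('lumini', 0), ('protectii', 0), ('transport', 0),
--     ('piese', 1), ('anvelope', 1), ('jante', 1), ('lanturi', 1), ('frane', 1),
--     ('echipament', 2), ('casti', 2), ('manusi', 2), ('tricouri', 2), ('pantofi', 2),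
--     ('scule', 3), ('intretinere', 3), ('unelte', 3),
--     ('e-bike', 4), ('cadre-e-bike', 4), ('protectii-si-accesorii-e-bike', 4),
--     ('copii', 5), ('roti-ajutatoare', 5), ('scaune-pentru-copii', 5),
-- ]
-- LABELS = ['accesorii', 'piese', 'echipament', 'scule', 'e-bike', 'copii']
--
-- def determine_category_type(category_path: str) -> str:
--     """Determine category type based on path."""
--     best = None
--     for term, pri in TERMS:
--         if term in category_path and (best is None or pri < best):
--             best = pri
--     return LABELS[best] if best is not None else 'general'
-- ===== Notes on version B (the rewrite author's own statement) =====
-- stated objective: alternative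
-- what changed: Replaces the grouped if/elif first-match chain by a flat term-to-priority table scanned in one full pass with a minimum-priority accumulator, indexing a label array at the end.
import Mathlib
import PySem

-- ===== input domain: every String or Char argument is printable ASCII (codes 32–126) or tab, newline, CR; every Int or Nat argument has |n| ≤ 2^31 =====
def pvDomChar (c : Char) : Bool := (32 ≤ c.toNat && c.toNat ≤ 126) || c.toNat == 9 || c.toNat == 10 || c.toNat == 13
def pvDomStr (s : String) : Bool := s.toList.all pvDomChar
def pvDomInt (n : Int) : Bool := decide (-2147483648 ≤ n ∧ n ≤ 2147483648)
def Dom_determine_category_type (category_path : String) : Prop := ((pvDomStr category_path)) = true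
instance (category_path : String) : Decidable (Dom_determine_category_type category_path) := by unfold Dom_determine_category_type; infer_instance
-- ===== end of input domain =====

-- B replaces the grouped first-match if/elif chain by a flat term→priority table scanned in
-- one full pass with a minimum-priority accumulator (alternative decomposition; same behaviour).

-- ===== PORT A =====
def determine_category_type (category_path : String) : String :=
  if (["accesorii", "lumini", "protectii", "transport"].any
      (fun term => PySem.Str.isIn term category_path)) then "accesorii"
  else if (["piese", "anvelope", "jante", "lanturi", "frane"].any
      (fun term => PySem.Str.isIn term category_path)) then "piese"
  else if (["echipament", "casti", "manusi", "tricouri", "pantofi"].any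
      (fun term => PySem.Str.isIn term category_path)) then "echipament"
  else if (["scule", "intretinere", "unelte"].any
      (fun term => PySem.Str.isIn term category_path)) then "scule"
  else if (["e-bike", "cadre-e-bike", "protectii-si-accesorii-e-bike"].any
      (fun term => PySem.Str.isIn term category_path)) then "e-bike"
  else if (["copii", "roti-ajutatoare", "scaune-pentru-copii"].any
      (fun term => PySem.Str.isIn term category_path)) then "copii"
  else "general"

-- ===== PORT B =====
def pvTerms : List (String × Nat) :=
  [("accesorii", 0), ("lumini", 0), ("protectii", 0), ("transport", 0),
   ("piese", 1), ("anvelope", 1), ("jante", 1), ("lanturi", 1), ("frane", 1),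
   ("echipament", 2), ("casti", 2), ("manusi", 2), ("tricouri", 2), ("pantofi", 2),
   ("scule", 3), ("intretinere", 3), ("unelte", 3),
   ("e-bike", 4), ("cadre-e-bike", 4), ("protectii-si-accesorii-e-bike", 4),
   ("copii", 5), ("roti-ajutatoare", 5), ("scaune-pentru-copii", 5)]

def pvLabels : List String :=
  ["accesorii", "piese", "echipament", "scule", "e-bike", "copii"]

def determine_category_type_alt (category_path : String) : String :=
  let best : Option Nat :=
    pvTerms.foldl (fun best tp =>
      if PySem.Str.isIn tp.1 category_path &&
         (match best with | none => true | some b => decide (tp.2 < b))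
      then some tp.2 else best) none
  match best with
  | some b => pvLabels.getD b "general"   -- LABELS[best]; b < 6 always, so getD never defaults
  | none => "general"

-- ===== PRECONDITION & SPEC =====
def Spec_determine_category_type (category_path : String) (out : String) : Prop :=
  out = determine_category_type_alt category_path
instance (category_path : String) (out : String) :
    Decidable (Spec_determine_category_type category_path out) := by
  unfold Spec_determine_category_type; infer_instance

-- ===== CLAIM =====
def Claim_equal_determine_category_type : Prop :=
  ∀ (category_path : String), Dom_determine_category_type category_path →
    Spec_determine_category_type category_path (determine_category_type category_path)

-- ===== LEMMAS AND PROOFS =====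

-- The fold step of B's port, named for the proofs (definitionally the inline lambda).
def pvStep (p : String) (best : Option Nat) (tp : String × Nat) : Option Nat :=
  if PySem.Str.isIn tp.1 p &&
     (match best with | none => true | some b => decide (tp.2 < b))
  then some tp.2 else best

-- Once the accumulator holds j and no later priority is below j, the fold is the identity.
theorem pvFold_skip (p : String) (l : List (String × Nat)) (j : Nat)
    (h : ∀ tp ∈ l, ¬ tp.2 < j) :
    l.foldl (pvStep p) (some j) = some j := by
  induction l with
  | nil => rfl
  | cons hd tl ih =>
    have hh : ¬ hd.2 < j := h hd (by simp)
    simp only [List.foldl_cons, pvStep, hh, decide_false, Bool.and_false]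
    exact ih (fun tp ht => h tp (by simp [ht]))

theorem pvFold_skip_map (p : String) (l : List String) (i j : Nat) (h : ¬ i < j) :
    (l.map (fun t => (t, i))).foldl (pvStep p) (some j) = some j := by
  apply pvFold_skip
  intro tp ht
  simp only [List.mem_map] at ht
  obtain ⟨t, _, rfl⟩ := ht
  simpa using h

-- Folding one uniform-priority group from none yields some i iff some term matches.
theorem pvFold_group (p : String) (l : List String) (i : Nat) :
    (l.map (fun t => (t, i))).foldl (pvStep p) none =
      if l.any (fun term => PySem.Str.isIn term p) then some i else none := by
  induction l with
  | nil => rfl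
  | cons hd tl ih =>
    simp only [List.map_cons, List.foldl_cons, List.any_cons]
    by_cases hm : PySem.Str.isIn hd p = true
    · rw [show pvStep p none (hd, i) = some i by simp only [pvStep, hm]; rfl,
          pvFold_skip p _ i (by simp)]
      simp only [hm, Bool.true_or]; rfl
    · have hm' : PySem.Str.isIn hd p = false := by simpa using hm
      rw [show pvStep p none (hd, i) = none by simp only [pvStep, hm']; rfl, ih]
      simp only [hm', Bool.false_or]

-- pvTerms is the concatenation of the six uniform-priority groups.
theorem pvTerms_split :
    pvTerms =
      (["accesorii", "lumini", "protectii", "transport"].map (fun t => (t, 0))) ++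
      (["piese", "anvelope", "jante", "lanturi", "frane"].map (fun t => (t, 1))) ++
      (["echipament", "casti", "manusi", "tricouri", "pantofi"].map (fun t => (t, 2))) ++
      (["scule", "intretinere", "unelte"].map (fun t => (t, 3))) ++
      (["e-bike", "cadre-e-bike", "protectii-si-accesorii-e-bike"].map (fun t => (t, 4))) ++
      (["copii", "roti-ajutatoare", "scaune-pentru-copii"].map (fun t => (t, 5))) := rfl

-- ===== VERDICT =====
theorem determine_category_type_spec : Claim_equal_determine_category_type := by
  intro p _
  unfold Spec_determine_category_type determine_category_type determine_category_type_alt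
  show (if _ then _ else _) = (match pvTerms.foldl (pvStep p) none with
    | some b => pvLabels.getD b "general" | none => "general")
  rw [pvTerms_split]
  simp only [List.foldl_append]
  cases h0 : ["accesorii", "lumini", "protectii", "transport"].any
      (fun term => PySem.Str.isIn term p) with
  | true =>
    have e0 : (["accesorii", "lumini", "protectii", "transport"].map
        (fun t => (t, 0))).foldl (pvStep p) none = some 0 := by
      rw [pvFold_group, h0]; simp
    rw [e0, pvFold_skip_map p _ 1 0 (by omega), pvFold_skip_map p _ 2 0 (by omega),
        pvFold_skip_map p _ 3 0 (by omega), pvFold_skip_map p _ 4 0 (by omega),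
        pvFold_skip_map p _ 5 0 (by omega)]
    simp [pvLabels]
  | false =>
  have e0 : (["accesorii", "lumini", "protectii", "transport"].map
      (fun t => (t, 0))).foldl (pvStep p) none = none := by
    rw [pvFold_group, h0]; rfl
  rw [e0]
  cases h1 : ["piese", "anvelope", "jante", "lanturi", "frane"].any
      (fun term => PySem.Str.isIn term p) with
  | true =>
    have e1 : (["piese", "anvelope", "jante", "lanturi", "frane"].map
        (fun t => (t, 1))).foldl (pvStep p) none = some 1 := by
      rw [pvFold_group, h1]; simp
    rw [e1, pvFold_skip_map p _ 2 1 (by omega), pvFold_skip_map p _ 3 1 (by omega),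
        pvFold_skip_map p _ 4 1 (by omega), pvFold_skip_map p _ 5 1 (by omega)]
    simp [pvLabels]
  | false =>
  have e1 : (["piese", "anvelope", "jante", "lanturi", "frane"].map
      (fun t => (t, 1))).foldl (pvStep p) none = none := by
    rw [pvFold_group, h1]; rfl
  rw [e1]
  cases h2 : ["echipament", "casti", "manusi", "tricouri", "pantofi"].any
      (fun term => PySem.Str.isIn term p) with
  | true =>
    have e2 : (["echipament", "casti", "manusi", "tricouri", "pantofi"].map
        (fun t => (t, 2))).foldl (pvStep p) none = some 2 := by
      rw [pvFold_group, h2]; simp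
    rw [e2, pvFold_skip_map p _ 3 2 (by omega), pvFold_skip_map p _ 4 2 (by omega),
        pvFold_skip_map p _ 5 2 (by omega)]
    simp [pvLabels]
  | false =>
  have e2 : (["echipament", "casti", "manusi", "tricouri", "pantofi"].map
      (fun t => (t, 2))).foldl (pvStep p) none = none := by
    rw [pvFold_group, h2]; rfl
  rw [e2]
  cases h3 : ["scule", "intretinere", "unelte"].any
      (fun term => PySem.Str.isIn term p) with
  | true =>
    have e3 : (["scule", "intretinere", "unelte"].map
        (fun t => (t, 3))).foldl (pvStep p) none = some 3 := by
      rw [pvFold_group, h3]; simp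
    rw [e3, pvFold_skip_map p _ 4 3 (by omega), pvFold_skip_map p _ 5 3 (by omega)]
    simp [pvLabels]
  | false =>
  have e3 : (["scule", "intretinere", "unelte"].map
      (fun t => (t, 3))).foldl (pvStep p) none = none := by
    rw [pvFold_group, h3]; rfl
  rw [e3]
  cases h4 : ["e-bike", "cadre-e-bike", "protectii-si-accesorii-e-bike"].any
      (fun term => PySem.Str.isIn term p) with
  | true =>
    have e4 : (["e-bike", "cadre-e-bike", "protectii-si-accesorii-e-bike"].map
        (fun t => (t, 4))).foldl (pvStep p) none = some 4 := by
      rw [pvFold_group, h4]; simp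
    rw [e4, pvFold_skip_map p _ 5 4 (by omega)]
    simp [pvLabels]
  | false =>
  have e4 : (["e-bike", "cadre-e-bike", "protectii-si-accesorii-e-bike"].map
      (fun t => (t, 4))).foldl (pvStep p) none = none := by
    rw [pvFold_group, h4]; rfl
  rw [e4]
  cases h5 : ["copii", "roti-ajutatoare", "scaune-pentru-copii"].any
      (fun term => PySem.Str.isIn term p) with
  | true =>
    have e5 : (["copii", "roti-ajutatoare", "scaune-pentru-copii"].map
        (fun t => (t, 5))).foldl (pvStep p) none = some 5 := by
      rw [pvFold_group, h5]; simp
    rw [e5]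
    simp [pvLabels]
  | false =>
    have e5 : (["copii", "roti-ajutatoare", "scaune-pentru-copii"].map
        (fun t => (t, 5))).foldl (pvStep p) none = none := by
      rw [pvFold_group, h5]; rfl
    rw [e5]
    simp
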